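-- pv_equiv track=rewrite | github.com/Coding-Capybara/CodingTestWinner | programmers/148653/c7c4ff.py | solution
-- ===== SOURCE A (Python) =====
-- def solution(storey):
--     answer = 0
--
--     while storey:
--         remainder = storey % 10
--         if remainder == 5 and storey // 10 % 10 >= 5 or remainder > 5:
--             storey += 10 - remainder
--             answer += 10 - remainder
--         else:
--             answer += remainder
--         storey = storey // 10
--
--     return answer
-- ===== SOURCE B (Python) =====
-- def solution(storey):
--     digits = []
--     while storey:
--         digits.append(storey % 10)
--         storey //= 10
--     c0, c1 = 0, 1  # cost of finishing the remaining (higher) digits with carry 0 / 1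
--     for d in reversed(digits):
--         c0, c1 = min(d + c0, 10 - d + c1), min(d + 1 + c0, 9 - d + c1)
--     return c0
-- ===== Notes on version B (the rewrite author's own statement) =====
-- stated objective: alternative
-- what changed: Replaces A's greedy per-digit loop with its hardcoded look-ahead tie-break on the middle remainder by a digit-list dynamic program: extract the decimal digits once, then fold over them keeping the pair (cost with carry, cost without carry), taking the min of going down vs rounding up at each digit.
-- outside the precondition, e.g. on solution(-6): A returns 5, B does not finish within the time limit
import Mathlib
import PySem

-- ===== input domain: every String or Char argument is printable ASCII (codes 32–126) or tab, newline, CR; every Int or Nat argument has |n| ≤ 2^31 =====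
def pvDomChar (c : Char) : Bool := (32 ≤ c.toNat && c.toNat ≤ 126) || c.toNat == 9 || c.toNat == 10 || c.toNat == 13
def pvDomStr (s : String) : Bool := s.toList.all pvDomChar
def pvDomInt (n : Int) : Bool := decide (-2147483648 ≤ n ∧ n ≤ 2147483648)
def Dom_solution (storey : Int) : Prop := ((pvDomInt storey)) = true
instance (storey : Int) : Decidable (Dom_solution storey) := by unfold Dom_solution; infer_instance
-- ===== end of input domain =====

-- B replaces A's greedy digit loop (with its hardcoded look-ahead tie-break on the middle
-- remainder) by a digit-list DP folding the pair (cost without carry, cost with carry); objective: alternative.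

-- termination facts for the ports' loops (cited by name in decreasing_by)
theorem pvNatAbs_down_lt (s : Int) (h1 : s ≠ 0) (h2 : PySem.Int.mod s 10 ≤ 5) :
    (PySem.Int.floordiv s 10).natAbs < s.natAbs := by
  have h10 : (0:Int) < 10 := by omega
  rw [PySem.Int.floordiv_eq_ediv_of_pos h10]
  rw [PySem.Int.mod_eq_emod_of_pos h10] at h2
  omega

theorem pvNatAbs_up_lt (s : Int) (h2 : 5 ≤ PySem.Int.mod s 10) :
    (PySem.Int.floordiv (s + (10 - PySem.Int.mod s 10)) 10).natAbs < s.natAbs := by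
  have h10 : (0:Int) < 10 := by omega
  rw [PySem.Int.floordiv_eq_ediv_of_pos h10, PySem.Int.mod_eq_emod_of_pos h10]
  rw [PySem.Int.mod_eq_emod_of_pos h10] at h2
  omega

theorem pvNatAbs_pos_lt (s : Int) (h : 0 < s) :
    (PySem.Int.floordiv s 10).natAbs < s.natAbs := by
  have h10 : (0:Int) < 10 := by omega
  rw [PySem.Int.floordiv_eq_ediv_of_pos h10]
  omega

-- ===== PORT A =====
-- A's while loop, tail-recursive on (storey, answer); `remainder` is inlined
def solutionGo (storey answer : Int) : Int :=
  if _h : storey = 0 then answer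
  else if _h2 : (PySem.Int.mod storey 10 = 5 ∧ 5 ≤ PySem.Int.mod (PySem.Int.floordiv storey 10) 10)
      ∨ 5 < PySem.Int.mod storey 10 then
    solutionGo (PySem.Int.floordiv (storey + (10 - PySem.Int.mod storey 10)) 10)
      (answer + (10 - PySem.Int.mod storey 10))
  else
    solutionGo (PySem.Int.floordiv storey 10) (answer + PySem.Int.mod storey 10)
termination_by storey.natAbs
decreasing_by
  · exact pvNatAbs_up_lt storey (by rcases _h2 with ⟨h, _⟩ | h <;> omega)
  · exact pvNatAbs_down_lt storey _h (by omega)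

def solution (storey : Int) : Int := solutionGo storey 0

-- ===== PORT B =====
-- B's digit-extraction while loop; for storey ≤ 0 it returns [] (the Python loop does not
-- terminate on negative storey, which Pre_solution excludes; [] is exact at storey = 0)
def digitsGo (storey : Int) : List Int :=
  if _h : 0 < storey then
    PySem.Int.mod storey 10 :: digitsGo (PySem.Int.floordiv storey 10)
  else []
termination_by storey.natAbs
decreasing_by exact pvNatAbs_pos_lt storey _h

-- one step of B's fold over the reversed digit list
def bStep (p : Int × Int) (d : Int) : Int × Int :=
  (min (d + p.1) (10 - d + p.2), min (d + 1 + p.1) (9 - d + p.2))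

def solution_alt (storey : Int) : Int :=
  ((digitsGo storey).reverse.foldl bStep (0, 1)).1

-- ===== PRECONDITION & SPEC =====
-- Pre_ excludes negative storey (outside the problem's natural domain of floor numbers):
-- A returns a value there, but B's digit-extraction loop never terminates (-1 // 10 == -1).
def Pre_solution (storey : Int) : Prop := 0 ≤ storey
instance (storey : Int) : Decidable (Pre_solution storey) := by unfold Pre_solution; infer_instance
def pvWitness_solution : Int := 2554

def Spec_solution (storey : Int) (out : Int) : Prop := out = solution_alt storey
instance (storey : Int) (out : Int) : Decidable (Spec_solution storey out) := by unfold Spec_solution; infer_instance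

-- ===== CLAIM (what is proved, stated in full; the proofs are below) =====
def Claim_equal_solution : Prop := ∀ (storey : Int), Dom_solution storey → Pre_solution storey → Spec_solution storey (solution storey)

-- ===== LEMMAS AND PROOFS =====

-- proof-side view of B's fold: cost of a digit list given an incoming carry c ∈ {0,1}
def cost : List Int → Int → Int
  | [], c => c
  | d :: ds, c => min (d + c + cost ds 0) (10 - (d + c) + cost ds 1)

theorem cost_nil (c : Int) : cost [] c = c := rfl

theorem cost_cons (d : Int) (ds : List Int) (c : Int) :
    cost (d :: ds) c = min (d + c + cost ds 0) (10 - (d + c) + cost ds 1) := rfl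

theorem foldl_bStep_eq_cost (ds : List Int) :
    ds.reverse.foldl bStep (0, 1) = (cost ds 0, cost ds 1) := by
  induction ds with
  | nil => rfl
  | cons d ds ih =>
    simp only [List.reverse_cons, List.foldl_append, ih, List.foldl_cons, List.foldl_nil,
      bStep, cost_cons, Prod.mk.injEq]
    omega

-- equation lemmas for digitsGo, phrased with Lean's `%` and `/` (= Python's, divisor 10 > 0)
theorem digitsGo_eq {s : Int} (h : 0 < s) : digitsGo s = (s % 10) :: digitsGo (s / 10) := by
  rw [digitsGo]
  simp [h]

theorem digitsGo_nonpos {s : Int} (h : s ≤ 0) : digitsGo s = [] := by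
  rw [digitsGo]; exact dif_neg (by omega)

theorem cost_lipschitz (ds : List Int) :
    cost ds 1 ≤ cost ds 0 + 1 ∧ cost ds 0 ≤ cost ds 1 + 1 := by
  cases ds with
  | nil => simp [cost_nil]
  | cons d ds => rw [cost_cons, cost_cons]; omega

-- head digit ≥ 5: carrying up is at least as cheap
theorem cost_head_ge5 (t : Int) (ht : 0 < t) (h5 : 5 ≤ t % 10) :
    cost (digitsGo t) 1 ≤ cost (digitsGo t) 0 := by
  rw [digitsGo_eq ht, cost_cons, cost_cons]
  have := cost_lipschitz (digitsGo (t / 10))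
  omega

-- head digit ≤ 4 (or no digits left): not carrying is at least as cheap
theorem cost_head_le4 (t : Int) (ht : 0 ≤ t) (h4 : t % 10 ≤ 4) :
    cost (digitsGo t) 0 ≤ cost (digitsGo t) 1 := by
  by_cases h : 0 < t
  · rw [digitsGo_eq h, cost_cons, cost_cons]
    have hd : 0 ≤ t % 10 := by omega
    have := cost_lipschitz (digitsGo (t / 10))
    omega
  · rw [digitsGo_nonpos (by omega), cost_nil, cost_nil]; omega

-- carry shift: digits of s with carry 1 cost the same as digits of s + 1 with carry 0
theorem cost_carry_shift (s : Int) (hs : 0 ≤ s) :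
    cost (digitsGo (s + 1)) 0 = cost (digitsGo s) 1 := by
  by_cases h0 : s = 0
  · subst h0
    have e1 : ((0:Int) + 1) % 10 = 1 := by decide
    have e2 : ((0:Int) + 1) / 10 = 0 := by decide
    rw [digitsGo_eq (by omega : (0:Int) < 0 + 1), e1, e2, digitsGo_nonpos le_rfl,
      cost_cons, cost_nil, cost_nil]
    omega
  · have hpos : 0 < s := by omega
    have hq : 0 ≤ s / 10 := Int.ediv_nonneg hs (by omega)
    rw [digitsGo_eq hpos, digitsGo_eq (by omega : (0:Int) < s + 1)]
    by_cases hr : s % 10 = 9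
    · have hm : (s + 1) % 10 = 0 := by omega
      have ht : (s + 1) / 10 = s / 10 + 1 := by omega
      rw [hm, ht, hr, cost_cons, cost_cons]
      have ih := cost_carry_shift (s / 10) hq
      have lip := cost_lipschitz (digitsGo (s / 10 + 1))
      have lip2 := cost_lipschitz (digitsGo (s / 10))
      omega
    · have hm : (s + 1) % 10 = s % 10 + 1 := by omega
      have ht : (s + 1) / 10 = s / 10 := by omega
      rw [hm, ht, cost_cons, cost_cons]
      omega
termination_by s.natAbs
decreasing_by omega

theorem solutionGo_zero (a : Int) : solutionGo 0 a = a := by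
  rw [solutionGo]; simp

theorem solutionGo_acc (s a : Int) : solutionGo s a = a + solutionGo s 0 := by
  by_cases h0 : s = 0
  · subst h0; rw [solutionGo_zero, solutionGo_zero]; ring
  · conv_lhs => rw [solutionGo]
    conv_rhs => rw [solutionGo]
    simp only [dif_neg h0]
    by_cases hc : (PySem.Int.mod s 10 = 5 ∧ 5 ≤ PySem.Int.mod (PySem.Int.floordiv s 10) 10)
        ∨ 5 < PySem.Int.mod s 10
    · simp only [dif_pos hc]
      rw [solutionGo_acc _ (a + _), solutionGo_acc _ (0 + _)]; ring
    · simp only [dif_neg hc]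
      rw [solutionGo_acc _ (a + _), solutionGo_acc _ (0 + _)]; ring
termination_by s.natAbs
decreasing_by
  all_goals
    have h10 : (0:Int) < 10 := by omega
    simp only [PySem.Int.mod_eq_emod_of_pos h10, PySem.Int.floordiv_eq_ediv_of_pos h10] at *
    omega

-- the heart: A's greedy choice always attains B's min
theorem solutionGo_eq_cost (s : Int) (hs : 0 ≤ s) :
    solutionGo s 0 = cost (digitsGo s) 0 := by
  have h10 : (0:Int) < 10 := by omega
  by_cases h0 : s = 0
  · subst h0; rw [solutionGo, digitsGo_nonpos le_rfl]; simp [cost_nil]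
  · have hpos : 0 < s := by omega
    have hq : 0 ≤ s / 10 := Int.ediv_nonneg hs (by omega)
    have ihdown := solutionGo_eq_cost (s / 10) hq
    have hlip := cost_lipschitz (digitsGo (s / 10))
    rw [solutionGo]
    simp only [dif_neg h0, PySem.Int.mod_eq_emod_of_pos h10, PySem.Int.floordiv_eq_ediv_of_pos h10]
    rw [digitsGo_eq hpos, cost_cons]
    split
    · -- up branch of A: round the digit up (possibly by the look-ahead tie-break)
      rename_i hcond
      have ihup := solutionGo_eq_cost (s / 10 + 1) (by omega)
      have hshift := cost_carry_shift (s / 10) hq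
      have harg : (s + (10 - s % 10)) / 10 = s / 10 + 1 := by omega
      rw [harg, solutionGo_acc, ihup, hshift]
      rcases hcond with ⟨hr5, hnext⟩ | hr6
      · have htpos : 0 < s / 10 := by omega
        have hdir := cost_head_ge5 (s / 10) htpos hnext
        omega
      · omega
    · -- down branch of A: pay the digit as is
      rename_i hcond
      have h1 : ¬ 5 < s % 10 := fun hx => hcond (Or.inr hx)
      rw [solutionGo_acc, ihdown]
      by_cases hr5 : s % 10 = 5
      · have hnext : (s / 10) % 10 ≤ 4 := by
          by_contra hb
          exact hcond (Or.inl ⟨hr5, by omega⟩)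
        have hdir := cost_head_le4 (s / 10) hq hnext
        omega
      · omega
termination_by s.natAbs
decreasing_by all_goals omega

-- ===== VERDICT (by name: the statement is the Claim_ definition above) =====
theorem solution_spec : Claim_equal_solution := by
  intro storey _hdom hpre
  show solution storey = solution_alt storey
  rw [solution, solution_alt, foldl_bStep_eq_cost]
  exact solutionGo_eq_cost storey hpre
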